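-- pv_equiv track=rewrite | github.com/Abhishek-28-eng/DGPrediction | src/Sixth.py | find_top_interests
-- ===== SOURCE A (Python) =====
-- def find_top_interests(row):
--     # Exclude the Unique_ID column
--     subject_marks = {subject: mark for subject, mark in row.items() if subject != "Student_id"}
--
--     # Find the highest and second-highest marks
--     unique_marks = sorted(set(subject_marks.values()), reverse=True)
--     if len(unique_marks) >= 2:
--         top_marks = unique_marks[:2]  # Top two unique marks
--     elif len(unique_marks) == 1:
--         top_marks = unique_marks  # Only one unique mark
--     else:
--         top_marks = []  # No marks present
--
--     # Collect all subjects with marks in top_marks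
--     top_subjects = [subject for subject, mark in subject_marks.items() if mark in top_marks]
--     return ", ".join(top_subjects)
-- ===== SOURCE B (Python) =====
-- def find_top_interests(row):
--     # Two max-passes over the marks instead of sorting the set of distinct marks.
--     items = [(s, m) for s, m in row.items() if s != "Student_id"]
--     marks = [m for _, m in items]
--     if not marks:
--         return ""
--     best = max(marks)
--     rest = [m for m in marks if m < best]
--     tops = [best, max(rest)] if rest else [best]
--     return ", ".join(s for s, m in items if m in tops)
-- ===== Notes on version B (the rewrite author's own statement) =====
-- stated objective: simpler
-- what changed: Replaces sorted(set(values), reverse=True)[:2] and the three-way length branch by two plain max passes (overall best, then best among marks strictly below it), keeping the dict-order collection and ', ' join.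
import Mathlib
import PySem

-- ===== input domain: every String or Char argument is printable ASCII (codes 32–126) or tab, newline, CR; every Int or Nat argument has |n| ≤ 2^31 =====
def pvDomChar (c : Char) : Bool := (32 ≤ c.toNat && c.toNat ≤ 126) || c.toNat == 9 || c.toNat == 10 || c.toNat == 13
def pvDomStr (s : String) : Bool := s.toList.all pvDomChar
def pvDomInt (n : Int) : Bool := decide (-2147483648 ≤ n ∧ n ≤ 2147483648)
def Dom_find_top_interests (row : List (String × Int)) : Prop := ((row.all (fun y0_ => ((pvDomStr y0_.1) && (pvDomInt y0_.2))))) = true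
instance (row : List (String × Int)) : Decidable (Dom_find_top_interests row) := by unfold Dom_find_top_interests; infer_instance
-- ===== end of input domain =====

-- B replaces sorted(set(values), reverse=True)[:2] and its length branches by two max passes; objective: simpler.
-- The parameter is a Python dict: both ports read it through PySem.Dict.ofList row (dict insertion semantics).

-- ===== PORT A =====
def find_top_interests (row : List (String × Int)) : String :=
  -- subject_marks = {subject: mark for subject, mark in row.items() if subject != "Student_id"}
  let subject_marks : PySem.Dict String Int :=
    (PySem.Dict.ofList row).items.foldl
      (fun d kv => if kv.1 ≠ "Student_id" then d.insert kv.1 kv.2 else d) PySem.Dict.empty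
  -- unique_marks = sorted(set(subject_marks.values()), reverse=True)
  let unique_marks : List Int :=
    PySem.List.sorted (PySem.Set.ofList subject_marks.values) (fun x : Int => x) true
  -- the three-way branch; unique_marks[:2] = take 2 (slice with nonneg upper bound)
  let top_marks : List Int :=
    if unique_marks.length ≥ 2 then unique_marks.take 2
    else if unique_marks.length = 1 then unique_marks
    else []
  -- top_subjects = [subject for subject, mark in subject_marks.items() if mark in top_marks]
  let top_subjects : List String :=
    (subject_marks.items.filter (fun kv => decide (kv.2 ∈ top_marks))).map (fun kv => kv.1)
  PySem.Str.join ", " top_subjects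

-- ===== PORT B =====
def find_top_interests_alt (row : List (String × Int)) : String :=
  let items := (PySem.Dict.ofList row).items.filter (fun kv => kv.1 ≠ "Student_id")
  let marks := items.map (fun kv => kv.2)
  match PySem.List.max? marks (fun x : Int => x) with
  | none => ""                                   -- if not marks: return ""
  | some best =>
    let rest := marks.filter (fun m => decide (m < best))
    let tops : List Int := 
      match PySem.List.max? rest (fun x : Int => x) with
      | none => [best]
      | some second => [best, second]
    PySem.Str.join ", " ((items.filter (fun kv => decide (kv.2 ∈ tops))).map (fun kv => kv.1))

-- ===== PRECONDITION & SPEC =====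
def Spec_find_top_interests (row : List (String × Int)) (out : String) : Prop := out = find_top_interests_alt row
instance (row : List (String × Int)) (out : String) : Decidable (Spec_find_top_interests row out) := by unfold Spec_find_top_interests; infer_instance

-- ===== CLAIM (what is proved, stated in full; the proofs are below) =====
def Claim_equal_find_top_interests : Prop := ∀ (row : List (String × Int)), Dom_find_top_interests row → Spec_find_top_interests row (find_top_interests row)

-- ===== LEMMAS AND PROOFS =====


-- subject_marks is built by inserting the filtered items of the row dict, whose keys are distinct:
-- its items list is exactly the filtered items list B uses.
theorem pv_subj_items (l : List (String × Int)) (hn : (l.map Prod.fst).Nodup) :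
    (l.foldl (fun d kv => if kv.1 ≠ "Student_id" then d.insert kv.1 kv.2 else d)
      (PySem.Dict.empty : PySem.Dict String Int)).items
    = l.filter (fun kv => decide (kv.1 ≠ "Student_id")) := by
  have h1 : l.foldl (fun d kv => if kv.1 ≠ "Student_id" then d.insert kv.1 kv.2 else d)
      (PySem.Dict.empty : PySem.Dict String Int)
      = (l.filter (fun kv => decide (kv.1 ≠ "Student_id"))).foldl
          (fun d kv => d.insert kv.1 kv.2) PySem.Dict.empty := by
    rw [List.foldl_filter]; simp
  have h2 : ((l.filter (fun kv => decide (kv.1 ≠ "Student_id"))).map Prod.fst).Nodup :=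
    hn.sublist (List.Sublist.map Prod.fst List.filter_sublist)
  rw [h1, PySem.Dict.items_foldl_insert_fresh _ Prod.fst Prod.snd _
        (fun a _ => PySem.Dict.contains_empty _) h2]
  simp [PySem.Dict.empty]

-- sorted(set(marks), reverse=True) starts with the maximum, followed by
-- sorted(set of the marks strictly below it, reverse=True).
theorem pv_sorted_top (marks : List Int) (best : Int)
    (hb : PySem.List.max? marks (fun x : Int => x) = some best) :
    PySem.List.sorted (PySem.Set.ofList marks) (fun x : Int => x) true
      = best :: PySem.List.sorted (PySem.Set.ofList (marks.filter (fun m => decide (m < best))))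
          (fun x : Int => x) true := by
  set rest := marks.filter (fun m => decide (m < best)) with hrest
  set T := PySem.List.sorted (PySem.Set.ofList rest) (fun x : Int => x) true with hT
  have hmemT : ∀ x, x ∈ T ↔ (x ∈ marks ∧ x < best) := by
    intro x
    rw [hT, PySem.List.mem_sorted, PySem.Set.mem_ofList, hrest, List.mem_filter]
    simp
  have hTnd : T.Nodup := ((PySem.List.sorted_perm _ _ _).nodup_iff).mpr (PySem.Set.nodup_ofList _)
  have hbestmem : best ∈ marks := PySem.List.max?_mem hb
  have hle : ∀ y ∈ marks, y ≤ best := fun y hy => PySem.List.max?_isMax hb y hy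
  apply PySem.List.sorted_rev_eq_of_perm_of_pairwise_gt
  · rw [List.perm_ext_iff_of_nodup]
    · intro a
      simp only [List.mem_cons, hmemT a, PySem.Set.mem_ofList]
      constructor
      · rintro (rfl | ⟨h1, _⟩) <;> assumption
      · intro ha
        rcases lt_or_eq_of_le (hle a ha) with h | h
        · exact Or.inr ⟨ha, h⟩
        · exact Or.inl h
    · exact List.nodup_cons.mpr ⟨fun h => absurd rfl (ne_of_lt ((hmemT best).mp h).2), hTnd⟩
    · exact PySem.Set.nodup_ofList _
  · refine List.pairwise_cons.mpr ⟨fun b hb' => ((hmemT b).mp hb').2, ?_⟩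
    have h1 := PySem.List.sorted_pairwise_rev (PySem.Set.ofList rest) (fun x : Int => x)
    rw [← hT] at h1
    have h2 : List.Pairwise (fun a b : Int => a ≠ b) T := hTnd
    exact (h1.and h2).imp (fun ⟨hle', hne⟩ => lt_of_le_of_ne hle' (Ne.symm hne))

-- ===== VERDICT (by name: the statement is the Claim_ definition above) =====
theorem find_top_interests_spec : Claim_equal_find_top_interests := by
  intro row _
  unfold Spec_find_top_interests find_top_interests find_top_interests_alt
  have hnd : ((PySem.Dict.ofList row).items.map Prod.fst).Nodup :=
    PySem.Dict.nodup_keys_ofList row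
  set l := (PySem.Dict.ofList row).items with hl
  set L := l.filter (fun kv => decide (kv.1 ≠ "Student_id")) with hL
  have hitems := pv_subj_items l hnd
  simp only [hitems, PySem.Dict.values, ← hL]
  set marks := L.map (fun kv => kv.2) with hmarks
  cases hmax : PySem.List.max? marks (fun x : Int => x) with
  | none =>
    have hm : marks = [] := (PySem.List.max?_eq_none_iff _ _).mp hmax
    have hLnil : L = [] := by
      cases hLc : L with
      | nil => rfl
      | cons a t => rw [hmarks, hLc] at hm; simp at hm
    simp [hLnil, PySem.Str.join]
  | some best =>
    rw [pv_sorted_top marks best hmax]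
    set rest := marks.filter (fun m => decide (m < best)) with hrest
    set T := PySem.List.sorted (PySem.Set.ofList rest) (fun x : Int => x) true with hT
    cases hmax2 : PySem.List.max? rest (fun x : Int => x) with
    | none =>
      have hr : rest = [] := (PySem.List.max?_eq_none_iff _ _).mp hmax2
      have hTnil : T = [] := by
        rw [hT, PySem.List.sorted_eq_nil_iff]
        simp [hr]
      have hmax2' : PySem.List.max? (marks.filter (fun m => decide (m < best))) (fun x : Int => x) = none := hmax2
      simp [hTnil, hmax2']
    | some second =>
      have hTne : T ≠ [] := by
        rw [hT, Ne, PySem.List.sorted_eq_nil_iff]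
        intro h
        have : second ∈ PySem.Set.ofList rest :=
          (PySem.Set.mem_ofList _ _).mpr (PySem.List.max?_mem hmax2)
        rw [h] at this; exact absurd this (List.not_mem_nil)
      obtain ⟨h, t, hTc⟩ := List.exists_cons_of_ne_nil hTne
      have hhs : h = second := by
        have h1 : h ≤ second := by
          have hmem : h ∈ T := by rw [hTc]; exact List.mem_cons_self
          rw [hT, PySem.List.mem_sorted, PySem.Set.mem_ofList] at hmem
          exact PySem.List.max?_isMax hmax2 h hmem
        have h2 : second ≤ h := by
          have hs : second ∈ PySem.Set.ofList rest :=
            (PySem.Set.mem_ofList _ _).mpr (PySem.List.max?_mem hmax2)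
          exact PySem.List.key_head_sorted_rev_ge _ _ (hT ▸ hTc) second hs
        exact le_antisymm h1 h2
      have hmax2' : PySem.List.max? (marks.filter (fun m => decide (m < best))) (fun x : Int => x) = some second := hmax2
      rw [hTc, hhs]
      simp [hmax2']
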